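-- pv_equiv track=rewrite | github.com/juliarzymowska/WDI | lesson_programs/zad90.py | new_number
-- ===== SOURCE A (Python) =====
-- def new_number(number, mask):
--     counter = 0
--     k = 0  # new number
--
--     while number > 0:
--         if mask % 2 == 1:
--             k += (number % 10) * (10 ** counter)
--             counter += 1
--
--         mask //= 2
--         number //= 10
--
--     return k
-- ===== SOURCE B (Python) =====
-- def new_number(number, mask):
--     # pass 1: explode the number into its digits, least-significant first
--     digits = []
--     while number > 0:
--         digits.append(number % 10)
--         number //= 10
--     # pass 2: keep the digits whose mask bit is set
--     kept = [d for i, d in enumerate(digits) if (mask >> i) & 1]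
--     # pass 3: rebuild the value by Horner evaluation, most-significant first
--     k = 0
--     for d in reversed(kept):
--         k = k * 10 + d
--     return k
-- ===== Notes on version B (the rewrite author's own statement) =====
-- stated objective: alternative
-- what changed: A interleaves digit extraction, mask testing and a running power-of-ten accumulator in one while loop; B decomposes into three passes: explode the number into a LSB-first digit list, filter it by mask bits via enumerate and (mask >> i) & 1, then rebuild the result by Horner evaluation over the kept digits in MSB-first order.
import Mathlib
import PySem

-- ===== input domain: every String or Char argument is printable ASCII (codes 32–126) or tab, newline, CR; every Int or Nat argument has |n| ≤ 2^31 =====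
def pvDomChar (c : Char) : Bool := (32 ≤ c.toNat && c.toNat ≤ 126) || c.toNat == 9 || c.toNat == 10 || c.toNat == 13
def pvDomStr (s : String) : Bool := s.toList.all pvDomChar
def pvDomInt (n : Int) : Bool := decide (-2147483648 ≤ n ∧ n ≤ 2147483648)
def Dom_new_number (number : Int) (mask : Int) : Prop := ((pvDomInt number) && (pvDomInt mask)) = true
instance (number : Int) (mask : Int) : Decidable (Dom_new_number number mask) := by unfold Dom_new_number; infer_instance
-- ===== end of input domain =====

-- B replaces A's single interleaved loop (running power-of-ten accumulator) by a
-- three-pass decomposition: explode into a digit list, filter by mask bits, Horner rebuild. Objective: alternative.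

-- ===== PORT A =====
-- A's while loop; Python's 'counter' is a nonnegative int used only as the exponent of
-- 10 ** counter, represented as a Nat (it starts at 0 and is only incremented).
def newNumberLoop (number : Int) (mask : Int) (counter : Nat) (k : Int) : Int :=
  if h : number > 0 then
    if PySem.Int.mod mask 2 == 1 then
      newNumberLoop (PySem.Int.floordiv number 10) (PySem.Int.floordiv mask 2) (counter + 1)
        (k + (PySem.Int.mod number 10) * 10 ^ counter)
    else
      newNumberLoop (PySem.Int.floordiv number 10) (PySem.Int.floordiv mask 2) counter k
  else k
termination_by number.toNat
decreasing_by
  all_goals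
    have h10 : PySem.Int.floordiv number 10 = number / 10 :=
      PySem.Int.floordiv_eq_ediv_of_pos (by omega)
    rw [h10]; omega

def new_number (number : Int) (mask : Int) : Int :=
  newNumberLoop number mask 0 0

-- ===== PORT B =====
-- pass 1 of Source B: the digits of number, least-significant first
def digitsOf (n : Int) : List Int :=
  if h : n > 0 then PySem.Int.mod n 10 :: digitsOf (PySem.Int.floordiv n 10) else []
termination_by n.toNat
decreasing_by
  have h10 : PySem.Int.floordiv n 10 = n / 10 :=
    PySem.Int.floordiv_eq_ediv_of_pos (by omega)
  rw [h10]; omega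

-- Source B; Python's '(mask >> i) & 1' is 'PySem.Int.band (mask >>> i.toNat) 1' (the enumerate
-- indices are nonnegative, so .toNat is exact); '>>>'/'band' are Python-exact per PYSEM.md.
def new_number_alt (number : Int) (mask : Int) : Int :=
  let digits := digitsOf number
  let kept := ((PySem.List.enumerate digits 0).filter
      (fun p => PySem.Int.band (mask >>> ((p.1.toNat : Nat) : Int)) 1 == 1)).map (·.2)
  kept.reverse.foldl (fun k d => k * 10 + d) 0

-- ===== PRECONDITION & SPEC =====
def Spec_new_number (number : Int) (mask : Int) (out : Int) : Prop := out = new_number_alt number mask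
instance (number : Int) (mask : Int) (out : Int) : Decidable (Spec_new_number number mask out) := by unfold Spec_new_number; infer_instance

-- ===== CLAIM (what is proved, stated in full; the proofs are below) =====
def Claim_equal_new_number : Prop := ∀ (number : Int) (mask : Int), Dom_new_number number mask → Spec_new_number number mask (new_number number mask)

-- ===== LEMMAS AND PROOFS =====

-- recursive form of Source B's mask filter
def recKept : List Int → Int → List Int
  | [], _ => []
  | d :: ds, m =>
      if PySem.Int.band m 1 == 1 then d :: recKept ds (m >>> (1:Int)) else recKept ds (m >>> (1:Int))

-- LSB-first value of a digit list
def valLSB : List Int → Int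
  | [] => 0
  | d :: ds => d + 10 * valLSB ds

theorem shr_one (m : Int) : m >>> (1:Int) = PySem.Int.floordiv m 2 := by
  have h1 : (1:Int) = ((1:Nat):Int) := by norm_num
  rw [h1, Int.shiftRight_natCast_right, Int.shiftRight_eq]
  unfold Int.shiftRight PySem.Int.floordiv
  cases m with
  | ofNat n =>
      show (Int.ofNat (n >>> 1)) = _
      rw [Int.fdiv_eq_ediv]
      simp [Nat.shiftRight_eq_div_pow]
  | negSucc n =>
      show Int.negSucc (n >>> 1) = _
      simp [Int.fdiv, Nat.shiftRight_eq_div_pow]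

theorem shr_succ (m : Int) (j : Nat) :
    (m >>> ((j:Nat):Int)) >>> (1:Int) = m >>> (((j+1:Nat)):Int) := by
  have h1 : (1:Int) = ((1:Nat):Int) := by norm_num
  rw [h1, Int.shiftRight_natCast_right, Int.shiftRight_natCast_right,
    Int.shiftRight_natCast_right, Int.shiftRight_add]

theorem kept_eq_recKept (ds : List Int) (m : Int) (j : Nat) :
    ((PySem.List.enumerate ds (j : Int)).filter
      (fun p => PySem.Int.band (m >>> ((p.1.toNat : Nat) : Int)) 1 == 1)).map (·.2)
      = recKept ds (m >>> ((j:Nat):Int)) := by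
  induction ds generalizing j with
  | nil => simp [PySem.List.enumerate_nil, recKept]
  | cons d ds ih =>
      rw [PySem.List.enumerate_cons, List.filter_cons]
      have hj1 : ((j : Int) + 1) = ((j + 1 : Nat) : Int) := by push_cast; ring
      have hpred : (PySem.Int.band (m >>> (((((j:Int), d)).1.toNat : Nat) : Int)) 1 == 1)
          = (PySem.Int.band (m >>> ((j:Nat):Int)) 1 == 1) := by norm_num
      rw [hj1]
      by_cases hb : PySem.Int.band (m >>> ((j:Nat):Int)) 1 == 1
      · rw [if_pos (by rw [hpred]; exact hb), List.map_cons, ih (j + 1)]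
        simp only [recKept, hb, if_pos, shr_succ]
      · rw [if_neg (by rw [hpred]; exact hb), ih (j + 1)]
        simp only [recKept, shr_succ]
        rw [if_neg (by exact hb)]

theorem foldl_horner_reverse (l : List Int) :
    l.reverse.foldl (fun k d => k * 10 + d) 0 = valLSB l := by
  induction l with
  | nil => simp [valLSB]
  | cons d ds ih =>
      simp [List.foldl_append, valLSB, ih]
      ring

theorem loop_eq (fuel : Nat) (n m : Int) (counter : Nat) (k : Int) (hf : n.toNat ≤ fuel) :
    newNumberLoop n m counter k = k + 10 ^ counter * valLSB (recKept (digitsOf n) m) := by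
  induction fuel generalizing n m counter k with
  | zero =>
      have hn : ¬ n > 0 := by omega
      rw [newNumberLoop, digitsOf]
      simp [hn, recKept, valLSB]
  | succ f ih =>
      rw [newNumberLoop, digitsOf]
      by_cases hn : n > 0
      · have h10 : PySem.Int.floordiv n 10 = n / 10 :=
          PySem.Int.floordiv_eq_ediv_of_pos (by omega)
        have hfl : (PySem.Int.floordiv n 10).toNat ≤ f := by rw [h10]; omega
        have hband : (PySem.Int.band m 1 == 1) = (PySem.Int.mod m 2 == 1) := by
          rw [PySem.Int.band_one]
        have hshift : m >>> (1:Int) = PySem.Int.floordiv m 2 := shr_one m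
        simp only [hn, dif_pos, recKept, hband, hshift]
        by_cases hm : PySem.Int.mod m 2 == 1
        · simp only [hm, if_pos]
          rw [ih _ _ _ _ hfl]
          simp [valLSB, pow_succ]
          ring
        · rw [if_neg (by exact hm), if_neg (by exact hm)]
          rw [ih _ _ _ _ hfl]
      · rw [dif_neg hn, dif_neg hn]
        simp [recKept, valLSB]

-- ===== VERDICT (by name: the statement is the Claim_ definition above) =====
theorem new_number_spec : Claim_equal_new_number := by
  intro number mask _
  show new_number number mask = new_number_alt number mask
  rw [new_number, new_number_alt]
  rw [foldl_horner_reverse]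
  have h0 : mask >>> (((0:Nat)):Int) = mask := by
    rw [Int.shiftRight_natCast_right]; simp
  have hk := kept_eq_recKept (digitsOf number) mask 0
  rw [h0] at hk
  simp only [Nat.cast_zero] at hk
  rw [hk, loop_eq number.toNat number mask 0 0 (le_refl _)]
  ring
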